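-- pv_equiv track=rewrite | github.com/guhaojie/work | games/cards.py | deal_player_cards
-- ===== SOURCE A (Python) =====
-- def deal_player_cards(deck_of_cards, player_num, num_of_cards):
--     res = []
--     for _ in range(player_num):
--         res.append([])
--     for _ in range(num_of_cards):
--         for _i in range(player_num):
--             res[_i].append(deck_of_cards.pop())
--     return res
-- ===== SOURCE B (Python) =====
-- def deal_player_cards(deck_of_cards, player_num, num_of_cards):
--     dealt = [deck_of_cards.pop() for _ in range(num_of_cards) for _ in range(player_num)]
--     return [dealt[i::player_num] for i in range(player_num)]
-- ===== Notes on version B (the rewrite author's own statement) =====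
-- stated objective: alternative
-- what changed: B pops all the dealt cards into one flat list with a single comprehension and then extracts each player's hand by stride slicing dealt[i::player_num], replacing A's nested per-round appends into indexed per-player lists.
import Mathlib
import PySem

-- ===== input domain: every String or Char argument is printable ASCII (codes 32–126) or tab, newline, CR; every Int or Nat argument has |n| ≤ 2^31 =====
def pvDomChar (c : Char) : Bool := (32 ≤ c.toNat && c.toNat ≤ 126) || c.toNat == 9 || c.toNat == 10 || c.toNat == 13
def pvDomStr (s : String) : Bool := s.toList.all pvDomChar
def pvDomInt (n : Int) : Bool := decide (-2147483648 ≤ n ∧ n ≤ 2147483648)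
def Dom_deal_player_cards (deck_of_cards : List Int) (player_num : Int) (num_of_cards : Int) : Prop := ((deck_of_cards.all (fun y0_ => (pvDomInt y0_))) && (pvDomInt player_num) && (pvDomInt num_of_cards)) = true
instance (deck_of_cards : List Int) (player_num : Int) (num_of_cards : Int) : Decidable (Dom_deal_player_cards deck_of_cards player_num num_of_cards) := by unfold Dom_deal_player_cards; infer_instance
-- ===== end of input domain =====

-- B pops all dealt cards into one flat list and extracts each hand by stride slicing dealt[i::player_num]
-- (objective: alternative). Both Pythons mutate deck_of_cards by popping the same cards in the same
-- order; the equivalence proved here is about the RETURN value.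

-- ===== PORT A =====
-- res[_i].append(deck_of_cards.pop()); the index _i comes from range(player_num) so it is nonnegative.
-- On an empty deck Python raises IndexError (pop? = none): that input is excluded by Pre_, the port keeps the state.
def dealStepA (st : List (List Int) × List Int) (i : Int) : List (List Int) × List Int :=
  match PySem.List.pop? st.2 with
  | some (v, rest) => (st.1.set i.toNat ((st.1.getD i.toNat []) ++ [v]), rest)
  | none => st

def deal_player_cards (deck_of_cards : List Int) (player_num : Int) (num_of_cards : Int) : List (List Int) :=
  -- res = player_num empty lists; then num_of_cards rounds of the inner per-player loop
  ((PySem.List.pyRange 0 num_of_cards 1).foldl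
      (fun st _ => (PySem.List.pyRange 0 player_num 1).foldl dealStepA st)
      ((PySem.List.pyRange 0 player_num 1).foldl (fun r _ => r ++ [[]]) [], deck_of_cards)).1

-- ===== PORT B =====
-- dealt.append(deck_of_cards.pop()): one pop of the flat comprehension; IndexError on empty deck is
-- excluded by Pre_, the port keeps the state.
def popOnce (st : List Int × List Int) : List Int × List Int :=
  match PySem.List.pop? st.2 with
  | some (v, rest) => (st.1 ++ [v], rest)
  | none => st

def deal_player_cards_alt (deck_of_cards : List Int) (player_num : Int) (num_of_cards : Int) : List (List Int) :=
  -- dealt = [deck_of_cards.pop() for _ in range(num_of_cards) for _ in range(player_num)]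
  let dealt :=
    ((PySem.List.pyRange 0 num_of_cards 1).foldl
        (fun st _ => (PySem.List.pyRange 0 player_num 1).foldl (fun st2 _ => popOnce st2) st)
        ([], deck_of_cards)).1
  -- [dealt[i::player_num] for i in range(player_num)]; the step player_num is ≥ 1 whenever the
  -- comprehension is nonempty, so slice? never returns none there (the [] arm is unreachable)
  (PySem.List.pyRange 0 player_num 1).map (fun i =>
    match PySem.List.slice? dealt (some i) none player_num with
    | some h => h
    | none => [])

-- ===== PRECONDITION & SPEC =====
-- Pre_ excludes exactly the short decks on which Python's deck_of_cards.pop() raises IndexError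
-- (both A and B pop player_num*num_of_cards times when both counts are positive, none otherwise).
def Pre_deal_player_cards (deck_of_cards : List Int) (player_num : Int) (num_of_cards : Int) : Prop :=
  (0 < player_num ∧ 0 < num_of_cards) → player_num * num_of_cards ≤ (deck_of_cards.length : Int)
instance (deck_of_cards : List Int) (player_num : Int) (num_of_cards : Int) : Decidable (Pre_deal_player_cards deck_of_cards player_num num_of_cards) := by unfold Pre_deal_player_cards; infer_instance

def pvWitness_deal_player_cards : List Int × Int × Int := ([1, 2, 3, 4, 5, 6], 2, 3)

def Spec_deal_player_cards (deck_of_cards : List Int) (player_num : Int) (num_of_cards : Int) (out : List (List Int)) : Prop := out = deal_player_cards_alt deck_of_cards player_num num_of_cards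
instance (deck_of_cards : List Int) (player_num : Int) (num_of_cards : Int) (out : List (List Int)) : Decidable (Spec_deal_player_cards deck_of_cards player_num num_of_cards out) := by unfold Spec_deal_player_cards; infer_instance

-- ===== CLAIM (what is proved, stated in full; the proofs are below) =====
def Claim_equal_deal_player_cards : Prop := ∀ (deck_of_cards : List Int) (player_num : Int) (num_of_cards : Int), Dom_deal_player_cards deck_of_cards player_num num_of_cards → Pre_deal_player_cards deck_of_cards player_num num_of_cards → Spec_deal_player_cards deck_of_cards player_num num_of_cards (deal_player_cards deck_of_cards player_num num_of_cards)

-- ===== LEMMAS AND PROOFS =====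

-- B's flat pop pass, one level: popping l.length times moves deck.reverse.take l.length onto acc.
lemma popOnce_fold (l : List Int) : ∀ (acc deck : List Int), l.length ≤ deck.length →
    l.foldl (fun st _ => popOnce st) (acc, deck)
      = (acc ++ deck.reverse.take l.length, (deck.reverse.drop l.length).reverse) := by
  induction l with
  | nil => intro acc deck _; simp
  | cons a l ih =>
    intro acc deck h
    rcases List.eq_nil_or_concat deck with rfl | ⟨ys, y, rfl⟩
    · simp at h
    · have hlen : l.length ≤ ys.length := by
        simp only [List.concat_eq_append, List.length_append, List.length_cons,
          List.length_nil] at h ⊢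
        omega
      have hstep : popOnce (acc, ys.concat y) = (acc ++ [y], ys) := by
        simp [popOnce, List.concat_eq_append, PySem.List.pop?_last]
      rw [List.foldl_cons, hstep, ih _ _ hlen]
      simp [List.concat_eq_append, List.reverse_append]

-- B's nested comprehension: outer.length rounds of inner.length pops = outer.length*inner.length pops.
lemma popOnce_nest (outer inner : List Int) : ∀ (acc deck : List Int),
    outer.length * inner.length ≤ deck.length →
    outer.foldl (fun st _ => inner.foldl (fun st2 _ => popOnce st2) st) (acc, deck)
      = (acc ++ deck.reverse.take (outer.length * inner.length),
         (deck.reverse.drop (outer.length * inner.length)).reverse) := by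
  induction outer with
  | nil => intro acc deck _; simp
  | cons a outer ih =>
    intro acc deck h
    have hm : inner.length ≤ deck.length := by
      simp only [List.length_cons, Nat.succ_mul] at h; omega
    rw [List.foldl_cons, popOnce_fold inner acc deck hm]
    have hlen2 : outer.length * inner.length ≤ ((deck.reverse.drop inner.length).reverse).length := by
      simp only [List.length_reverse, List.length_drop, List.length_cons, Nat.succ_mul] at h ⊢
      omega
    rw [ih _ _ hlen2]
    simp only [List.reverse_reverse, List.length_cons, Nat.succ_mul, List.drop_drop]
    refine Prod.ext ?_ ?_
    · rw [Nat.add_comm (outer.length * inner.length) inner.length, List.take_add,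
        List.append_assoc]
    · rw [Nat.add_comm inner.length (outer.length * inner.length)]

-- filterMap that never drops is a map.
lemma filterMap_all_some {α β : Type} (f : α → Option β) (g : α → β) :
    ∀ (l : List α), (∀ x ∈ l, f x = some (g x)) → l.filterMap f = l.map g := by
  intro l
  induction l with
  | nil => intro _; simp
  | cons a l ih =>
    intro h
    rw [List.filterMap_cons, h a (by simp), List.map_cons, ih (fun x hx => h x (by simp [hx]))]

-- Python's xs[i::p] on a list of length p*c with 0 ≤ i < p picks indices i, i+p, …, i+(c-1)p.
lemma slice?_stride (xs : List Int) (p c i : Nat) (hp : 0 < p) (hi : i < p)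
    (hL : xs.length = p * c) :
    PySem.List.slice? xs (some (i : Int)) none (p : Int)
      = some ((List.range c).map (fun k => xs.getD (i + p * k) 0)) := by
  rcases Nat.eq_zero_or_pos c with rfl | hc
  · have hxs : xs = [] := by
      cases xs with
      | nil => rfl
      | cons a t => simp at hL
    subst hxs
    simp only [List.range_zero, List.map_nil]
    simp [PySem.List.slice?, PySem.List.sliceIndices, hp.ne',
      (show ¬ ((p : Int) < 0) by omega), (show ¬ ((i : Int) < 0) by omega)]
  · have hstep : (p : Int) ≠ 0 := by omega
    have hilen : (i : Int) ≤ (xs.length : Int) := by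
      rw [hL]; push_cast
      calc (i : Int) ≤ (p : Int) := by omega
        _ ≤ (p : Int) * c := by nlinarith [(show (1 : Int) ≤ (c : Int) by omega)]
    have hslt : (i : Int) < (xs.length : Int) := by
      rw [hL]; push_cast
      nlinarith [(show (1 : Int) ≤ (c : Int) by omega), (show (i : Int) < (p : Int) by omega)]
    have hSI : PySem.List.sliceIndices xs.length (some (i : Int)) none (p : Int)
        = ((i : Int), (xs.length : Int), (p : Int)) := by
      simp [PySem.List.sliceIndices, (show ¬ ((p : Int) < 0) by omega),
        (show ¬ ((i : Int) < 0) by omega), min_eq_left hilen]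
    -- the count ⌈(len - i)/p⌉ is exactly c
    have hdiv : (((xs.length : Int) - i + p - 1) / p) = (c : Int) := by
      have hrw : ((xs.length : Int) - i + p - 1) = ((p : Int) - 1 - i) + p * c := by
        rw [hL]; push_cast; ring
      rw [hrw, Int.add_mul_ediv_left _ _ hstep,
        Int.ediv_eq_zero_of_lt (by omega) (by omega)]
      simp
    simp only [PySem.List.slice?, if_neg hstep, hSI,
      if_pos (show (0 : Int) < (p : Int) by omega), if_pos hslt, hdiv, Int.toNat_natCast]
    congr 1
    apply filterMap_all_some _ (fun k => xs.getD (i + p * k) 0)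
    intro k hk
    simp only [List.mem_range] at hk
    have hidx : ((i : Int) + (p : Int) * (k : Nat)).toNat = i + p * k := by
      have hcast : ((i : Int) + (p : Int) * (k : Nat)) = ((i + p * k : Nat) : Int) := by
        push_cast; ring
      rw [hcast, Int.toNat_natCast]
    have hbound : i + p * k < xs.length := by
      rw [hL]
      calc i + p * k < p + p * k := by omega
        _ = p * (k + 1) := by ring
        _ ≤ p * c := Nat.mul_le_mul_left _ (by omega)
    rw [hidx, List.getElem?_eq_getElem hbound]
    simp [List.getD, List.getElem?_eq_getElem hbound]

-- One inner round of A starting at player index a.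
lemma aloop_inner : ∀ (n a : Nat) (res : List (List Int)) (deck : List Int),
    a + n = res.length → n ≤ deck.length →
    ((List.range n).map (fun k : Nat => ((a : Int) + k))).foldl dealStepA (res, deck)
      = (res.mapIdx (fun i h => if a ≤ i then h ++ [deck.reverse.getD (i - a) 0] else h),
         (deck.reverse.drop n).reverse) := by
  intro n
  induction n with
  | zero =>
    intro a res deck h1 _
    simp only [List.range_zero, List.map_nil, List.foldl_nil, List.drop_zero,
      List.reverse_reverse]
    refine Prod.ext ?_ rfl
    apply List.ext_getElem (by simp)
    intro i hi hi'
    simp only [List.getElem_mapIdx]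
    rw [if_neg (by simp at hi; omega)]
  | succ n ih =>
    intro a res deck h1 h2
    rcases List.eq_nil_or_concat deck with rfl | ⟨ys, y, rfl⟩
    · simp at h2
    · have hys : n ≤ ys.length := by
        simp only [List.concat_eq_append, List.length_append, List.length_cons,
          List.length_nil] at h2; omega
      have ha : a < res.length := by omega
      rw [List.range_succ_eq_map, List.map_cons, List.map_map, List.foldl_cons]
      have hstep : dealStepA (res, ys.concat y) ((a : Int) + (0 : Nat)) =
          (res.set a (res.getD a [] ++ [y]), ys) := by
        simp [dealStepA, List.concat_eq_append, PySem.List.pop?_last]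
      rw [hstep]
      have hmap : (List.map ((fun k : Nat => ((a : Int) + k)) ∘ Nat.succ) (List.range n))
          = (List.range n).map (fun k : Nat => (((a + 1 : Nat) : Int) + k)) := by
        apply List.map_congr_left; intro k _
        simp only [Function.comp]; push_cast [Nat.succ_eq_add_one]; ring
      rw [hmap, ih (a + 1) _ ys (by simp; omega) hys]
      refine Prod.ext ?_ ?_
      · apply List.ext_getElem (by simp)
        intro i hi hi'
        simp only [List.getElem_mapIdx, List.getElem_set, List.concat_eq_append,
          List.reverse_append, List.reverse_cons, List.reverse_nil, List.nil_append,
          List.cons_append]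
        rcases lt_trichotomy i a with hlt | rfl | hgt
        · simp only [if_neg (show ¬ a + 1 ≤ i by omega), if_neg (show ¬ a = i by omega),
            if_neg (show ¬ a ≤ i by omega)]
        · simp only [if_neg (show ¬ i + 1 ≤ i by omega)]
          simp [List.getElem?_eq_getElem ha]
        · simp only [if_pos (show a + 1 ≤ i by omega), if_neg (show ¬ a = i by omega),
            if_pos (show a ≤ i by omega)]
          have h5 : i - a = (i - (a + 1)) + 1 := by omega
          rw [h5, List.getD_cons_succ]
      · simp [List.concat_eq_append, List.reverse_append]

-- mapIdx over a map of range is a map of range.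
lemma mapIdx_map_range {β : Type} (p : Nat) (F : Nat → β) (g : Nat → β → β) :
    ((List.range p).map F).mapIdx (fun i h => g i h) = (List.range p).map (fun i => g i (F i)) := by
  apply List.ext_getElem (by simp)
  intro i hi hi'
  simp [List.getElem_mapIdx]

-- A's outer loop: k rounds of dealing one card to each of p players.
lemma aloop_outer (p : Nat) : ∀ (k : Nat) (G : Nat → List Int) (deck : List Int),
    p * k ≤ deck.length →
    (List.range k).foldl
        (fun st _ => ((List.range p).map (fun j : Nat => ((0 : Int) + j))).foldl dealStepA st)
        ((List.range p).map G, deck)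
      = ((List.range p).map (fun i =>
            G i ++ (List.range k).map (fun r => deck.reverse.getD (r * p + i) 0)),
         (deck.reverse.drop (p * k)).reverse) := by
  intro k
  induction k with
  | zero => intro G deck _; simp
  | succ k ih =>
    intro G deck h
    rw [Nat.mul_succ] at h
    have hp1 : p ≤ deck.length := by omega
    rw [List.range_succ_eq_map, List.foldl_cons, List.foldl_map]
    have hinner := aloop_inner p 0 ((List.range p).map G) deck (by simp) hp1
    simp only [Nat.cast_zero] at hinner
    rw [hinner]
    simp only [Nat.zero_le, if_pos, Nat.sub_zero]
    rw [mapIdx_map_range p G (fun i h => h ++ [deck.reverse.getD i 0])]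
    have hlen2 : p * k ≤ ((deck.reverse.drop p).reverse).length := by
      simp only [List.length_reverse, List.length_drop]; omega
    have := ih (fun i => G i ++ [deck.reverse.getD i 0]) ((deck.reverse.drop p).reverse) hlen2
    simp only [List.foldl_map] at this ⊢
    rw [this]
    refine Prod.ext ?_ ?_
    · simp only [List.reverse_reverse]
      apply List.map_congr_left
      intro i _
      rw [List.map_cons, List.map_map, List.append_assoc]
      congr 1
      simp only [Nat.zero_mul, Nat.zero_add, List.singleton_append]
      congr 1
      apply List.map_congr_left
      intro r _
      simp only [Function.comp]
      have : (deck.reverse.drop p).getD (r * p + i) 0 = deck.reverse.getD (p + (r * p + i)) 0 := by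
        simp [List.getD, List.getElem?_drop]
      rw [this]
      congr 1
      rw [Nat.succ_eq_add_one]
      ring
    · simp only [List.reverse_reverse, List.drop_drop]
      congr 1
      ring

-- A's initial res: player_num empty hands.
lemma initA {α : Type} (l : List α) : ∀ acc : List (List Int),
    l.foldl (fun r _ => r ++ [[]]) acc = acc ++ l.map (fun _ => []) := by
  induction l with
  | nil => intro acc; simp
  | cons a l ih => intro acc; simp [List.foldl_cons, ih]

-- ===== VERDICT (by name: the statement is the Claim_ definition above) =====
theorem deal_player_cards_spec : Claim_equal_deal_player_cards := by
  intro deck p c _ hPre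
  unfold Spec_deal_player_cards deal_player_cards deal_player_cards_alt
  by_cases hp : p ≤ 0
  · rw [PySem.List.pyRange_one_eq_nil hp]
    simp
  · push_neg at hp
    have hpcast : ((p.toNat : Nat) : Int) = p := Int.toNat_of_nonneg (by omega)
    by_cases hc : c ≤ 0
    · -- no rounds: A returns p empty hands, B slices the empty flat list p times
      rw [PySem.List.pyRange_one_eq_nil hc]
      simp only [List.foldl_nil]
      rw [PySem.List.pyRange_one 0 p, initA]
      simp only [List.nil_append, List.map_map, Int.sub_zero, Function.comp_def, Int.zero_add]
      apply List.map_congr_left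
      intro j hj
      simp only [List.mem_range] at hj
      have hs := slice?_stride [] p.toNat 0 j (by omega) hj (by simp)
      rw [hpcast] at hs
      rw [hs]
      simp
    · push_neg at hc
      have hPre' : p * c ≤ (deck.length : Int) := hPre ⟨hp, hc⟩
      have hlen : p.toNat * c.toNat ≤ deck.length := by
        have := Int.toNat_le_toNat hPre'
        rw [Int.toNat_mul (by omega) (by omega)] at this
        simpa using this
      -- B side: the flat pass pops p*c cards
      rw [popOnce_nest (PySem.List.pyRange 0 c 1) (PySem.List.pyRange 0 p 1) [] deck
        (by simp only [PySem.List.length_pyRange_one, Int.sub_zero]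
            exact le_trans (Nat.le_of_eq (Nat.mul_comm _ _)) hlen)]
      simp only [List.nil_append, PySem.List.length_pyRange_one, Int.sub_zero]
      -- A side
      rw [PySem.List.pyRange_one 0 c, PySem.List.pyRange_one 0 p, List.foldl_map, initA]
      simp only [Int.sub_zero, List.nil_append, List.map_map, Function.comp_def]
      rw [aloop_outer p.toNat c.toNat (fun _ => []) deck (by simpa using hlen)]
      simp only [Int.zero_add, List.nil_append]
      apply List.map_congr_left
      intro i hi
      simp only [List.mem_range] at hi
      have hLd : (deck.reverse.take (c.toNat * p.toNat)).length = p.toNat * c.toNat := by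
        simp only [List.length_take, List.length_reverse]
        rw [Nat.mul_comm c.toNat p.toNat]
        omega
      have hs := slice?_stride (deck.reverse.take (c.toNat * p.toNat)) p.toNat c.toNat i
        (by omega) hi hLd
      rw [hpcast] at hs
      rw [hs]
      apply List.map_congr_left
      intro k hk
      simp only [List.mem_range] at hk
      have hbound : i + p.toNat * k < c.toNat * p.toNat := by
        have h1 : i + p.toNat * k < p.toNat * (k + 1) := by
          rw [Nat.mul_add]; omega
        have h2 : p.toNat * (k + 1) ≤ p.toNat * c.toNat := Nat.mul_le_mul_left _ (by omega)
        rw [Nat.mul_comm c.toNat p.toNat]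
        omega
      have htake : (deck.reverse.take (c.toNat * p.toNat)).getD (i + p.toNat * k) 0
          = deck.reverse.getD (i + p.toNat * k) 0 := by
        simp [List.getD, hbound]
      rw [htake]
      congr 1
      ring
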